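-- pv_equiv track=rewrite | github.com/xxl4tomxu98/tom-python | python_data_structure/sliding_windows/max_sum_k_consecutive_num.py | max_sum2
-- ===== SOURCE A (Python) =====
-- def max_sum2(arr, k):
--     max_sum = sum(arr[:k])
--     curr_sum = max_sum
--     for i in range(len(arr)-k):
--         curr_sum = curr_sum - arr[i] + arr[i+k]
--         if max_sum < curr_sum:
--             max_sum = curr_sum
--     return max_sum
-- ===== SOURCE B (Python) =====
-- def max_sum2(arr, k):
--     prefix = [0]
--     for x in arr:
--         prefix.append(prefix[-1] + x)
--     best = sum(arr[:k])
--     for i in range(len(arr) - k):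
--         best = max(best, prefix[i + k + 1] - prefix[i + 1])
--     return best
-- ===== Notes on version B (the rewrite author's own statement) =====
-- stated objective: alternative
-- what changed: Replaces A's rolling-window update with a prefix-sum table built in one pass, then a second pass taking the max of prefix differences.
import Mathlib
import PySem

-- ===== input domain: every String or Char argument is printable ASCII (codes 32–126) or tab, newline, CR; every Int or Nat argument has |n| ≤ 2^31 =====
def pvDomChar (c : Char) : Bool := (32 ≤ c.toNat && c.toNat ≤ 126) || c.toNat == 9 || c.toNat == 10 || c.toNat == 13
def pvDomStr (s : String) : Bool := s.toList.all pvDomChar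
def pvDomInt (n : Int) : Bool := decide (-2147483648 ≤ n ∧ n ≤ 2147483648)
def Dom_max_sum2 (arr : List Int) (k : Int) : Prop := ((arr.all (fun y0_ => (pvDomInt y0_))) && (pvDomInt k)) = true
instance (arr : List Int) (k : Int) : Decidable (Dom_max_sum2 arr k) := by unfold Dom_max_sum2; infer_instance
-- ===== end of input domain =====

-- B builds a prefix-sum table in one pass, then maximises prefix differences in a second pass (alternative decomposition; same O(n) cost).
-- ===== PORT A =====
-- rolling window: state (max_sum, curr_sum), curr_sum updated by subtracting arr[i] and adding arr[i+k]
def max_sum2 (arr : List Int) (k : Int) : Int :=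
  let ms0 := (PySem.List.slice arr none (some k)).sum
  ((PySem.List.pyRange 0 ((arr.length : Int) - k) 1).foldl
    (fun (st : Int × Int) i =>
      let cs := st.2 - PySem.List.pyGetD arr i 0 + PySem.List.pyGetD arr (i + k) 0
      (if st.1 < cs then cs else st.1, cs))
    (ms0, ms0)).1

-- ===== PORT B =====
def max_sum2_alt (arr : List Int) (k : Int) : Int :=
  let pfx := arr.foldl (fun p x => p ++ [PySem.List.pyGetD p (-1) 0 + x]) [0]
  let best0 := (PySem.List.slice arr none (some k)).sum
  (PySem.List.pyRange 0 ((arr.length : Int) - k) 1).foldl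
    (fun best i =>
      max best (PySem.List.pyGetD pfx (i + k + 1) 0 - PySem.List.pyGetD pfx (i + 1) 0))
    best0

-- ===== PRECONDITION & SPEC =====
-- A raises IndexError for every k < 0 (the loop runs past the end of arr); Pre_ keeps exactly the inputs on which A returns.
def Pre_max_sum2 (arr : List Int) (k : Int) : Prop := 0 ≤ k
instance (arr : List Int) (k : Int) : Decidable (Pre_max_sum2 arr k) := by unfold Pre_max_sum2; infer_instance
def pvWitness_max_sum2 : List Int × Int := ([1, -2, 3, 4], 2)
def Spec_max_sum2 (arr : List Int) (k : Int) (out : Int) : Prop := out = max_sum2_alt arr k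
instance (arr : List Int) (k : Int) (out : Int) : Decidable (Spec_max_sum2 arr k out) := by unfold Spec_max_sum2; infer_instance

-- ===== CLAIM (what is proved, stated in full; the proofs are below) =====
def Claim_equal_max_sum2 : Prop := ∀ (arr : List Int) (k : Int), Dom_max_sum2 arr k → Pre_max_sum2 arr k → Spec_max_sum2 arr k (max_sum2 arr k)

-- ===== LEMMAS AND PROOFS =====

/-- running prefix sums starting after accumulated value `s` -/
def psum (s : Int) : List Int → List Int
  | [] => []
  | x :: t => (s + x) :: psum (s + x) t

theorem build_eq (arr : List Int) : ∀ (p : List Int) (s : Int),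
    arr.foldl (fun p x => p ++ [PySem.List.pyGetD p (-1) 0 + x]) (p ++ [s])
      = (p ++ [s]) ++ psum s arr := by
  induction arr with
  | nil => intro p s; simp [psum]
  | cons x t ih =>
    intro p s
    simp only [List.foldl_cons, PySem.List.pyGetD_neg_one_append_singleton, psum]
    have := ih (p ++ [s]) (s + x)
    simpa [List.append_assoc] using this

theorem psum_getD (arr : List Int) : ∀ (s : Int) (j : Nat), j < arr.length →
    (psum s arr).getD j 0 = s + (arr.take (j + 1)).sum := by
  induction arr with
  | nil => intro s j h; simp at h
  | cons x t ih =>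
    intro s j h
    cases j with
    | zero => simp [psum]
    | succ j =>
      simp only [psum, List.getD_cons_succ]
      rw [ih (s + x) j (by simpa using h)]
      simp [List.take_succ_cons]
      ring

theorem pfx_getD (arr : List Int) (m : Nat) (hm : m ≤ arr.length) :
    PySem.List.pyGetD ((0 : Int) :: psum 0 arr) (m : Int) 0 = (arr.take m).sum := by
  rw [PySem.List.pyGetD_natCast]
  cases m with
  | zero => simp
  | succ j =>
    simp only [List.getD_cons_succ]
    rw [psum_getD arr 0 j (by omega)]
    simp

/-- the k-window sum starting at j, as a prefix difference -/
def wdiff (arr : List Int) (kn j : Nat) : Int :=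
  (arr.take (j + kn)).sum - (arr.take j).sum

theorem loop_eq (arr : List Int) (kn : Nat) (hkn : kn ≤ arr.length) (d : Nat) :
    ∀ (a : Nat), a + d = arr.length - kn → ∀ (ms : Int),
      ((PySem.List.pyRange (a : Int) ((arr.length : Int) - (kn : Int)) 1).foldl
          (fun (st : Int × Int) i =>
            let cs := st.2 - PySem.List.pyGetD arr i 0 + PySem.List.pyGetD arr (i + (kn : Int)) 0
            (if st.1 < cs then cs else st.1, cs))
          (ms, wdiff arr kn a)).1
      = (PySem.List.pyRange (a : Int) ((arr.length : Int) - (kn : Int)) 1).foldl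
          (fun best i =>
            max best (PySem.List.pyGetD ((0 : Int) :: psum 0 arr) (i + (kn : Int) + 1) 0
              - PySem.List.pyGetD ((0 : Int) :: psum 0 arr) (i + 1) 0))
          ms := by
  induction d with
  | zero =>
    intro a ha ms
    rw [PySem.List.pyRange_one_eq_nil (by omega)]
    simp
  | succ d ih =>
    intro a ha ms
    have hlt : (a : Int) < (arr.length : Int) - (kn : Int) := by omega
    rw [PySem.List.pyRange_one_cons hlt]
    simp only [List.foldl_cons]
    have hai : a < arr.length := by omega
    have haki : a + kn < arr.length := by omega
    have hga : PySem.List.pyGetD arr (a : Int) 0 = arr[a] := by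
      rw [PySem.List.pyGetD_natCast]; simp [List.getD_eq_getElem?_getD, List.getElem?_eq_getElem hai]
    have hgak : PySem.List.pyGetD arr ((a : Int) + (kn : Int)) 0 = arr[a + kn] := by
      rw [show (a : Int) + (kn : Int) = ((a + kn : Nat) : Int) by push_cast; ring,
        PySem.List.pyGetD_natCast]
      simp [List.getD_eq_getElem?_getD, List.getElem?_eq_getElem haki]
    have hcs : wdiff arr kn a - PySem.List.pyGetD arr (a : Int) 0
        + PySem.List.pyGetD arr ((a : Int) + (kn : Int)) 0 = wdiff arr kn (a + 1) := by
      rw [hga, hgak]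
      unfold wdiff
      rw [show a + 1 + kn = (a + kn) + 1 by ring, List.sum_take_succ _ _ haki,
        List.sum_take_succ _ _ hai]
      ring
    have hB : PySem.List.pyGetD ((0 : Int) :: psum 0 arr) ((a : Int) + (kn : Int) + 1) 0
        - PySem.List.pyGetD ((0 : Int) :: psum 0 arr) ((a : Int) + 1) 0
        = wdiff arr kn (a + 1) := by
      rw [show (a : Int) + (kn : Int) + 1 = ((a + kn + 1 : Nat) : Int) by push_cast; ring,
        show (a : Int) + 1 = ((a + 1 : Nat) : Int) by push_cast; ring,
        pfx_getD arr _ (by omega), pfx_getD arr _ (by omega)]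
      unfold wdiff
      rw [show a + kn + 1 = a + 1 + kn by ring]
    have hmax : (if ms < wdiff arr kn (a + 1) then wdiff arr kn (a + 1) else ms)
        = max ms (wdiff arr kn (a + 1)) := by
      rw [max_def]; split_ifs <;> omega
    simp only [hcs, hB, hmax]
    have := ih (a + 1) (by omega) (max ms (wdiff arr kn (a + 1)))
    rw [show ((a : Int) + 1) = ((a + 1 : Nat) : Int) by push_cast; ring]
    exact this

-- ===== VERDICT (by name: the statement is the Claim_ definition above) =====
theorem max_sum2_spec : Claim_equal_max_sum2 := by
  intro arr k _ hk
  unfold Spec_max_sum2 max_sum2 max_sum2_alt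
  have hk0 : (0 : Int) ≤ k := hk
  have hpfx : arr.foldl (fun p x => p ++ [PySem.List.pyGetD p (-1) 0 + x]) [0]
      = (0 : Int) :: psum 0 arr := by
    have := build_eq arr [] 0
    simpa using this
  rw [hpfx]
  by_cases hbig : (arr.length : Int) - k ≤ 0
  · rw [PySem.List.pyRange_one_eq_nil hbig]
    simp
  · rw [not_le] at hbig
    obtain ⟨kn, rfl⟩ : ∃ kn : Nat, k = (kn : Int) := ⟨k.toNat, by omega⟩
    have hkn : kn ≤ arr.length := by omega
    have hslice : (PySem.List.slice arr none (some (kn : Int))).sum = wdiff arr kn 0 := by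
      rw [PySem.List.slice_to_natCast]
      unfold wdiff
      simp
    rw [hslice]
    simpa using loop_eq arr kn hkn (arr.length - kn) 0 (by omega) (wdiff arr kn 0)
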